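-- pv_equiv track=rewrite | github.com/rdbharti/python-basics | Ceasar_Cipher.py | index_return
-- ===== SOURCE A (Python) =====
-- def index_return(i_num, incr):
--     count = i_num
--     if (incr >= 0):
--         for i in range(incr):
--             count += 1
--             if (count == 26):
--                 count = 0
--     if (incr < 0):
--         for i in range(abs(incr)):
--             count -= 1
--             if (count == -1):
--                 count = 25
--     return count
-- ===== SOURCE B (Python) =====
-- def index_return(i_num, incr):
--     return (i_num + incr) % 26
-- ===== Notes on version B (the rewrite author's own statement) =====
-- stated objective: simpler
-- what changed: Replaced the step-by-step loop of |incr| unit increments/decrements with direct modular arithmetic (i_num + incr) % 26; Pre_ restricts to the function's natural domain of alphabet indices 0 <= i_num < 26, outside which A's partial-wrapping values (wrapping only when the walk happens to touch 26 or -1) are an artefact of its single boundary check.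
-- outside the precondition, e.g. on index_return(30, 5): A returns 35, B returns 9; on index_return(-3, 1): A returns -2, B returns 24
import Mathlib
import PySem

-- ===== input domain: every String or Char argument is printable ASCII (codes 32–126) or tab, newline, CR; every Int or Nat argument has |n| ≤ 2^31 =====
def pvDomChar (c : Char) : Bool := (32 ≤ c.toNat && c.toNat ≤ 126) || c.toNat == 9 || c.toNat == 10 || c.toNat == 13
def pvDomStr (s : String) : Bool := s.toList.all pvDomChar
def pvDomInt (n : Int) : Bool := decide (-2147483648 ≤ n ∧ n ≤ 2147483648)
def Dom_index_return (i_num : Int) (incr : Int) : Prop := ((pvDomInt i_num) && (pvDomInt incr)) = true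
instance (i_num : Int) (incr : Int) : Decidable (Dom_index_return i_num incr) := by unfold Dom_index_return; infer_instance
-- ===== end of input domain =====

-- B replaces A's |incr|-step loop by direct modular arithmetic on the alphabet-index domain: simpler.

-- ===== PORT A =====
def index_return (i_num : Int) (incr : Int) : Int :=
  let count := i_num
  let count :=
    if incr ≥ 0 then
      (PySem.List.pyRange 0 incr 1).foldl
        (fun c _ => let c := c + 1; if c = 26 then 0 else c) count
    else count
  let count :=
    if incr < 0 then
      (PySem.List.pyRange 0 |incr| 1).foldl
        (fun c _ => let c := c - 1; if c = -1 then 25 else c) count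
    else count
  count

-- ===== PORT B =====
def index_return_alt (i_num : Int) (incr : Int) : Int :=
  PySem.Int.mod (i_num + incr) 26

-- ===== PRECONDITION & SPEC =====
-- Pre_ restricts to the function's natural domain, alphabet indices 0 ≤ i_num < 26 (the only
-- inputs the cipher produces); outside it A still returns, but its partial-wrapping values
-- (wrapping only when the walk happens to touch 26 or -1) are an artefact of its single
-- boundary check, not anything a caller would specify.
def Pre_index_return (i_num : Int) (incr : Int) : Prop := 0 ≤ i_num ∧ i_num < 26
instance (i_num : Int) (incr : Int) : Decidable (Pre_index_return i_num incr) := by unfold Pre_index_return; infer_instance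
def pvWitness_index_return : Int × Int := (3, -100)

def Spec_index_return (i_num : Int) (incr : Int) (out : Int) : Prop := out = index_return_alt i_num incr
instance (i_num : Int) (incr : Int) (out : Int) : Decidable (Spec_index_return i_num incr out) := by unfold Spec_index_return; infer_instance

-- ===== CLAIM (what is proved, stated in full; the proofs are below) =====
def Claim_equal_index_return : Prop := ∀ (i_num : Int) (incr : Int), Dom_index_return i_num incr → Pre_index_return i_num incr → Spec_index_return i_num incr (index_return i_num incr)

-- ===== LEMMAS AND PROOFS =====

-- A's upward loop in closed form: wraps iff it ever reaches 26
lemma up_fold (n : Nat) : ∀ (c : Int),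
    (PySem.List.pyRange 0 (n : Int) 1).foldl
      (fun c _ => let c := c + 1; if c = 26 then 0 else c) c
    = if c ≤ 25 ∧ 26 - c ≤ (n : Int) then (c + n) % 26 else c + n := by
  induction n with
  | zero => intro c; simp [PySem.List.pyRange]; omega
  | succ k ih =>
    intro c
    rw [show ((k + 1 : Nat) : Int) = (k : Int) + 1 by push_cast; ring,
        PySem.List.pyRange_one_succ_right (by omega), List.foldl_append, ih c]
    simp only [List.foldl]
    have hm0 : 0 ≤ (c + (k : Int)) % 26 := Int.emod_nonneg _ (by norm_num)
    have hm1 : (c + (k : Int)) % 26 < 26 := Int.emod_lt_of_pos _ (by norm_num)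
    split_ifs <;> omega

-- A's downward loop in closed form: wraps iff it ever reaches -1
lemma down_fold (n : Nat) : ∀ (c : Int),
    (PySem.List.pyRange 0 (n : Int) 1).foldl
      (fun c _ => let c := c - 1; if c = -1 then 25 else c) c
    = if 0 ≤ c ∧ c + 1 ≤ (n : Int) then (c - n) % 26 else c - n := by
  induction n with
  | zero => intro c; simp [PySem.List.pyRange]
  | succ k ih =>
    intro c
    rw [show ((k + 1 : Nat) : Int) = (k : Int) + 1 by push_cast; ring,
        PySem.List.pyRange_one_succ_right (by omega), List.foldl_append, ih c]
    simp only [List.foldl]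
    have hm0 : 0 ≤ (c - (k : Int)) % 26 := Int.emod_nonneg _ (by norm_num)
    have hm1 : (c - (k : Int)) % 26 < 26 := Int.emod_lt_of_pos _ (by norm_num)
    split_ifs <;> omega

-- ===== VERDICT (by name: the statement is the Claim_ definition above) =====
theorem index_return_spec : Claim_equal_index_return := by
  intro i_num incr _ hpre
  obtain ⟨h0, h26⟩ := hpre
  unfold Spec_index_return index_return index_return_alt
  rw [PySem.Int.mod_eq_emod_of_pos (by norm_num : (0:Int) < 26)]
  by_cases h : incr ≥ 0
  · obtain ⟨n, rfl⟩ := Int.eq_ofNat_of_zero_le h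
    simp only [h, if_pos, if_neg (by omega : ¬ ((n : Int) < 0)), up_fold n i_num]
    have hm0 : 0 ≤ (i_num + (n:Int)) % 26 := Int.emod_nonneg _ (by norm_num)
    have hm1 : (i_num + (n:Int)) % 26 < 26 := Int.emod_lt_of_pos _ (by norm_num)
    split_ifs with hc
    · rfl
    · -- no wrap: 0 ≤ i_num + n < 26, so it equals its own remainder
      omega
  · have hlt : incr < 0 := by omega
    obtain ⟨n, hn⟩ := Int.eq_ofNat_of_zero_le (by omega : (0:Int) ≤ -incr)
    have habs : |incr| = (n : Int) := by rw [abs_of_neg hlt, hn]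
    simp only [if_neg h, if_pos hlt, habs, down_fold n i_num]
    have heq : i_num - (n : Int) = i_num + incr := by omega
    rw [heq]
    have hm0 : 0 ≤ (i_num + incr) % 26 := Int.emod_nonneg _ (by norm_num)
    have hm1 : (i_num + incr) % 26 < 26 := Int.emod_lt_of_pos _ (by norm_num)
    split_ifs with hc
    · rfl
    · omega
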